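-- pv_equiv track=rewrite | github.com/noxke/python_game | slither-v2.py | show_info
-- ===== SOURCE A (Python) =====
-- def num(d, line):
--     if (line == 1):
--         if (d in [1]):
--             return "      #"
--         elif (d in [2, 3, 5, 6, 7, 8, 9, 0]):
--             return "# # # #"
--         elif (d in [4]):
--             return "#     #"
--     elif (line == 2):
--         if (d in [1, 2, 3, 7]):
--             return "      #"
--         elif (d in [4, 8, 9, 0]):
--             return "#     #"
--         elif (d in [5, 6]):
--             return "#      "
--     elif (line == 3):
--         if (d in [1, 7]):
--             return "      #"
--         elif (d in [2, 3, 4, 5, 6, 8, 9]):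
--             return "# # # #"
--         elif (d in [0]):
--             return "#     #"
--     elif (line == 4):
--         if (d in [1, 3, 4, 5, 7, 9]):
--             return "      #"
--         elif (d in [2]):
--             return "#      "
--         elif (d in [6, 8, 0]):
--             return "#     #"
--     elif (line == 5):
--         if (d in [1, 4, 7]):
--             return "      #"
--         elif (d in [2, 3, 5, 6, 8, 9, 0]):
--             return "# # # #"
--
-- def show_info(map_ls, score, game_time):
--     ls = ["",
--         "\033[0;36m  # # # #    \033[0m  ",
--         "\033[0;36m     #       \033[0m  ",
--         "\033[0;36m     #       \033[0m  ",
--         "\033[0;36m     #       \033[0m  ",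
--         "\033[0;36m     #       \033[0m  ",
--         "",
--         "\033[0;32m  # # # #    \033[0m  ",
--         "\033[0;32m  #          \033[0m  ",
--         "\033[0;32m  # # # #    \033[0m  ",
--         "\033[0;32m        #    \033[0m  ",
--         "\033[0;32m  # # # #    \033[0m  "]
--     a = game_time // 100 % 10
--     b = game_time // 10 % 10
--     c= game_time % 10
--     for i in range(1, 6):
--         ls[i] = ls[i] + "\033[0;34m" + num(a, i) + "  " + num(b, i) + "  " + num(c, i) + "\033[0m"
--     a = score // 100 % 10
--     b = score // 10 % 10
--     c = score % 10
--     for i in range(1, 6):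
--         ls[i + 6] = ls[i + 6] + "\033[0;35m" + num(a, i) + "  " + num(b, i) + "  " + num(c, i) + "\033[0m"
--     for i in range(12):
--         map_ls[i] += ls[i]
--     return map_ls
-- ===== SOURCE B (Python) =====
-- # Computes each digit glyph from a classic seven-segment encoding (segments a-g)
-- # instead of A's per-row branch cascade: horizontal rows render "# # # #" when
-- # their bar segment is lit, otherwise the two adjacent vertical segments are drawn.
-- # Mutates map_ls in place like A.
-- SEGS = {0: ["a", "b", "c", "d", "e", "f"],
--         1: ["b", "c"],
--         2: ["a", "b", "d", "e", "g"],
--         3: ["a", "b", "c", "d", "g"],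
--         4: ["b", "c", "f", "g"],
--         5: ["a", "c", "d", "f", "g"],
--         6: ["a", "c", "d", "e", "f", "g"],
--         7: ["a", "b", "c"],
--         8: ["a", "b", "c", "d", "e", "f", "g"],
--         9: ["a", "b", "c", "d", "f", "g"]}
--
-- # (horizontal bar, left vertical, right vertical) for each of the 5 display rows
-- ROWSPEC = [("a", "f", "b"),
--            ("",  "f", "b"),
--            ("g", "f", "b"),
--            ("",  "e", "c"),
--            ("d", "e", "c")]
--
-- TIME_ART = [
--     "\033[0;36m  # # # #    \033[0m  ",
--     "\033[0;36m     #       \033[0m  ",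
--     "\033[0;36m     #       \033[0m  ",
--     "\033[0;36m     #       \033[0m  ",
--     "\033[0;36m     #       \033[0m  ",
-- ]
--
-- SCORE_ART = [
--     "\033[0;32m  # # # #    \033[0m  ",
--     "\033[0;32m  #          \033[0m  ",
--     "\033[0;32m  # # # #    \033[0m  ",
--     "\033[0;32m        #    \033[0m  ",
--     "\033[0;32m  # # # #    \033[0m  ",
-- ]
--
--
-- def _glyph_row(d, r):
--     segs = SEGS[d]
--     h, left, right = ROWSPEC[r]
--     if h != "" and h in segs:
--         return "# # # #"
--     return ("#" if left in segs else " ") + "     " + ("#" if right in segs else " ")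
--
--
-- def _block(color, n):
--     a, b, c = n // 100 % 10, n // 10 % 10, n % 10
--     return [color + _glyph_row(a, r) + "  " + _glyph_row(b, r) + "  " + _glyph_row(c, r) + "\033[0m"
--             for r in range(5)]
--
--
-- def show_info(map_ls, score, game_time):
--     suffix = ([""]
--               + [art + gl for art, gl in zip(TIME_ART, _block("\033[0;34m", game_time))]
--               + [""]
--               + [art + gl for art, gl in zip(SCORE_ART, _block("\033[0;35m", score))])
--     for i in range(12):
--         map_ls[i] += suffix[i]
--     return map_ls
-- ===== Notes on version B (the rewrite author's own statement) =====
-- stated objective: alternative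
-- what changed: B stores no glyph rows at all: each row is computed from a classic seven-segment encoding (which of segments a-g a digit lights), rendering horizontal rows as a full bar when lit and otherwise drawing the two adjacent vertical segments, and assembles the 12 lines by zipping static art with rendered blocks instead of A's per-row branch cascade plus index-mutating loops.
import Mathlib
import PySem

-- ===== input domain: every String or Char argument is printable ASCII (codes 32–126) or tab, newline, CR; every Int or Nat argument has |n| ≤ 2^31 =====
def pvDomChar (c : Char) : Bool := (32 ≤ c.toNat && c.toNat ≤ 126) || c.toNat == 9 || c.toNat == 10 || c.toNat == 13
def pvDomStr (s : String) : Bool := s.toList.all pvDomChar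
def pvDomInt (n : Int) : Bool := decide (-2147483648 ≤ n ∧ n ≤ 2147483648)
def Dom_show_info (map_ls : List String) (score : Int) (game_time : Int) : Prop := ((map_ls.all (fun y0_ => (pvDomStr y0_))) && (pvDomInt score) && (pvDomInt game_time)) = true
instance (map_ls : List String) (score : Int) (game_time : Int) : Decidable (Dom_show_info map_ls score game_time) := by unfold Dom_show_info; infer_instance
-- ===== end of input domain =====

-- B computes each glyph row from a seven-segment encoding of the digit instead of
-- A's five-way branch cascade (objective: alternative). Both A and B mutate map_ls
-- in place in Python (appending to its first 12 entries); the equivalence proved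
-- here is about the returned list, and B performs the same mutation.

-- ===== PORT A =====
-- A's num: the nested branch cascade, literally. A returns None when no branch
-- matches; that is unreachable here (d is always a digit 0-9, line is 1-5), so the
-- fall-through is "" in this String-valued port.
def num (d : Int) (line : Int) : String :=
  if line = 1 then
    if d ∈ [(1:Int)] then "      #"
    else if d ∈ [(2:Int), 3, 5, 6, 7, 8, 9, 0] then "# # # #"
    else if d ∈ [(4:Int)] then "#     #"
    else ""
  else if line = 2 then
    if d ∈ [(1:Int), 2, 3, 7] then "      #"
    else if d ∈ [(4:Int), 8, 9, 0] then "#     #"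
    else if d ∈ [(5:Int), 6] then "#      "
    else ""
  else if line = 3 then
    if d ∈ [(1:Int), 7] then "      #"
    else if d ∈ [(2:Int), 3, 4, 5, 6, 8, 9] then "# # # #"
    else if d ∈ [(0:Int)] then "#     #"
    else ""
  else if line = 4 then
    if d ∈ [(1:Int), 3, 4, 5, 7, 9] then "      #"
    else if d ∈ [(2:Int)] then "#      "
    else if d ∈ [(6:Int), 8, 0] then "#     #"
    else ""
  else if line = 5 then
    if d ∈ [(1:Int), 4, 7] then "      #"
    else if d ∈ [(2:Int), 3, 5, 6, 8, 9, 0] then "# # # #"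
    else ""
  else ""

def show_info (map_ls : List String) (score : Int) (game_time : Int) : List String :=
  let ls : List String := ["",
    "\x1b[0;36m  # # # #    \x1b[0m  ",
    "\x1b[0;36m     #       \x1b[0m  ",
    "\x1b[0;36m     #       \x1b[0m  ",
    "\x1b[0;36m     #       \x1b[0m  ",
    "\x1b[0;36m     #       \x1b[0m  ",
    "",
    "\x1b[0;32m  # # # #    \x1b[0m  ",
    "\x1b[0;32m  #          \x1b[0m  ",
    "\x1b[0;32m  # # # #    \x1b[0m  ",
    "\x1b[0;32m        #    \x1b[0m  ",
    "\x1b[0;32m  # # # #    \x1b[0m  "]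
  let a := PySem.Int.mod (PySem.Int.floordiv game_time 100) 10
  let b := PySem.Int.mod (PySem.Int.floordiv game_time 10) 10
  let c := PySem.Int.mod game_time 10
  let ls := (PySem.List.pyRange 1 6 1).foldl (fun ls i =>
      ls.set i.toNat ((ls.getD i.toNat "") ++ "\x1b[0;34m" ++ num a i ++ "  " ++ num b i ++ "  " ++ num c i ++ "\x1b[0m")) ls
  let a := PySem.Int.mod (PySem.Int.floordiv score 100) 10
  let b := PySem.Int.mod (PySem.Int.floordiv score 10) 10
  let c := PySem.Int.mod score 10
  let ls := (PySem.List.pyRange 1 6 1).foldl (fun ls i =>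
      ls.set (i + 6).toNat ((ls.getD (i + 6).toNat "") ++ "\x1b[0;35m" ++ num a i ++ "  " ++ num b i ++ "  " ++ num c i ++ "\x1b[0m")) ls
  (PySem.List.pyRange 0 12 1).foldl (fun m i =>
      m.set i.toNat ((m.getD i.toNat "") ++ (ls.getD i.toNat ""))) map_ls

-- ===== PORT B =====
-- which of the seven segments a-g each digit lights
def pvSegs : PySem.Dict Int (List String) := PySem.Dict.ofList [
  (0, ["a", "b", "c", "d", "e", "f"]),
  (1, ["b", "c"]),
  (2, ["a", "b", "d", "e", "g"]),
  (3, ["a", "b", "c", "d", "g"]),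
  (4, ["b", "c", "f", "g"]),
  (5, ["a", "c", "d", "f", "g"]),
  (6, ["a", "c", "d", "e", "f", "g"]),
  (7, ["a", "b", "c"]),
  (8, ["a", "b", "c", "d", "e", "f", "g"]),
  (9, ["a", "b", "c", "d", "f", "g"])]

-- (horizontal bar, left vertical, right vertical) for each of the 5 display rows
def pvRowSpec : List (String × String × String) :=
  [("a", "f", "b"), ("", "f", "b"), ("g", "f", "b"), ("", "e", "c"), ("d", "e", "c")]

-- SEGS[d] and ROWSPEC[r] always hit (d is a digit 0-9, r < 5), so getD defaults are unreachable
def pvGlyphRow (d : Int) (r : Nat) : String :=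
  let segs := (PySem.Dict.get? pvSegs d).getD []
  let spec := pvRowSpec.getD r ("", "", "")
  if spec.1 ≠ "" ∧ spec.1 ∈ segs then "# # # #"
  else (if spec.2.1 ∈ segs then "#" else " ") ++ "     " ++ (if spec.2.2 ∈ segs then "#" else " ")

def pvTimeArt : List String := [
  "\x1b[0;36m  # # # #    \x1b[0m  ",
  "\x1b[0;36m     #       \x1b[0m  ",
  "\x1b[0;36m     #       \x1b[0m  ",
  "\x1b[0;36m     #       \x1b[0m  ",
  "\x1b[0;36m     #       \x1b[0m  "]

def pvScoreArt : List String := [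
  "\x1b[0;32m  # # # #    \x1b[0m  ",
  "\x1b[0;32m  #          \x1b[0m  ",
  "\x1b[0;32m  # # # #    \x1b[0m  ",
  "\x1b[0;32m        #    \x1b[0m  ",
  "\x1b[0;32m  # # # #    \x1b[0m  "]

def pvBlock (color : String) (n : Int) : List String :=
  let a := PySem.Int.mod (PySem.Int.floordiv n 100) 10
  let b := PySem.Int.mod (PySem.Int.floordiv n 10) 10
  let c := PySem.Int.mod n 10
  (List.range 5).map (fun r => color ++ pvGlyphRow a r ++ "  " ++ pvGlyphRow b r ++ "  " ++ pvGlyphRow c r ++ "\x1b[0m")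

def show_info_alt (map_ls : List String) (score : Int) (game_time : Int) : List String :=
  let suffix := [""]
    ++ (List.zipWith (fun art gl => art ++ gl) pvTimeArt (pvBlock "\x1b[0;34m" game_time))
    ++ [""]
    ++ (List.zipWith (fun art gl => art ++ gl) pvScoreArt (pvBlock "\x1b[0;35m" score))
  (List.range 12).foldl (fun m i =>
      m.set i ((m.getD i "") ++ (suffix.getD i ""))) map_ls

-- ===== PRECONDITION & SPEC =====
-- Pre_ excludes map_ls with fewer than 12 entries, where Python A raises IndexError
-- on `map_ls[i] += ls[i]`.
def Pre_show_info (map_ls : List String) (score : Int) (game_time : Int) : Prop :=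
  12 ≤ map_ls.length
instance (map_ls : List String) (score : Int) (game_time : Int) : Decidable (Pre_show_info map_ls score game_time) := by unfold Pre_show_info; infer_instance

def pvWitness_show_info : List String × Int × Int :=
  (["", "", "", "", "", "", "", "", "", "", "", ""], 42, 137)

def Spec_show_info (map_ls : List String) (score : Int) (game_time : Int) (out : List String) : Prop := out = show_info_alt map_ls score game_time
instance (map_ls : List String) (score : Int) (game_time : Int) (out : List String) : Decidable (Spec_show_info map_ls score game_time out) := by unfold Spec_show_info; infer_instance

-- ===== CLAIM (what is proved, stated in full; the proofs are below) =====
def Claim_equal_show_info : Prop := ∀ (map_ls : List String) (score : Int) (game_time : Int), Dom_show_info map_ls score game_time → Pre_show_info map_ls score game_time → Spec_show_info map_ls score game_time (show_info map_ls score game_time)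

-- ===== LEMMAS AND PROOFS =====

-- A's branch cascade and B's seven-segment renderer agree for every digit and row
theorem glyph_eq (d : Int) (hd0 : 0 ≤ d) (hd9 : d < 10) :
    num d 1 = pvGlyphRow d 0 ∧ num d 2 = pvGlyphRow d 1 ∧ num d 3 = pvGlyphRow d 2 ∧
    num d 4 = pvGlyphRow d 3 ∧ num d 5 = pvGlyphRow d 4 := by
  interval_cases d <;> exact ⟨by decide, by decide, by decide, by decide, by decide⟩

theorem show_info_spec' (map_ls : List String) (score : Int) (game_time : Int)
    (_ : Pre_show_info map_ls score game_time) :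
    show_info map_ls score game_time = show_info_alt map_ls score game_time := by
  obtain ⟨t1, t2, t3, t4, t5⟩ :=
    glyph_eq (PySem.Int.mod (PySem.Int.floordiv game_time 100) 10)
      (PySem.Int.mod_nonneg _ (by norm_num)) (PySem.Int.mod_lt _ (by norm_num))
  obtain ⟨u1, u2, u3, u4, u5⟩ :=
    glyph_eq (PySem.Int.mod (PySem.Int.floordiv game_time 10) 10)
      (PySem.Int.mod_nonneg _ (by norm_num)) (PySem.Int.mod_lt _ (by norm_num))
  obtain ⟨v1, v2, v3, v4, v5⟩ :=
    glyph_eq (PySem.Int.mod game_time 10)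
      (PySem.Int.mod_nonneg _ (by norm_num)) (PySem.Int.mod_lt _ (by norm_num))
  obtain ⟨x1, x2, x3, x4, x5⟩ :=
    glyph_eq (PySem.Int.mod (PySem.Int.floordiv score 100) 10)
      (PySem.Int.mod_nonneg _ (by norm_num)) (PySem.Int.mod_lt _ (by norm_num))
  obtain ⟨y1, y2, y3, y4, y5⟩ :=
    glyph_eq (PySem.Int.mod (PySem.Int.floordiv score 10) 10)
      (PySem.Int.mod_nonneg _ (by norm_num)) (PySem.Int.mod_lt _ (by norm_num))
  obtain ⟨z1, z2, z3, z4, z5⟩ :=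
    glyph_eq (PySem.Int.mod score 10)
      (PySem.Int.mod_nonneg _ (by norm_num)) (PySem.Int.mod_lt _ (by norm_num))
  simp only [show_info, show_info_alt, pvBlock]
  generalize PySem.Int.mod (PySem.Int.floordiv game_time 100) 10 = ta at t1 t2 t3 t4 t5 ⊢
  generalize PySem.Int.mod (PySem.Int.floordiv game_time 10) 10 = tb at u1 u2 u3 u4 u5 ⊢
  generalize PySem.Int.mod game_time 10 = tc at v1 v2 v3 v4 v5 ⊢
  generalize PySem.Int.mod (PySem.Int.floordiv score 100) 10 = sa at x1 x2 x3 x4 x5 ⊢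
  generalize PySem.Int.mod (PySem.Int.floordiv score 10) 10 = sb at y1 y2 y3 y4 y5 ⊢
  generalize PySem.Int.mod score 10 = sc at z1 z2 z3 z4 z5 ⊢
  have hr5 : PySem.List.pyRange 1 6 1 = [1, 2, 3, 4, 5] := by decide
  have hr12 : PySem.List.pyRange 0 12 1 = [0, 1, 2, 3, 4, 5, 6, 7, 8, 9, 10, 11] := by decide
  simp [hr5, hr12, List.range, List.range.loop, pvTimeArt, pvScoreArt,
    List.set, List.getD, Int.toNat,
    t1, t2, t3, t4, t5, u1, u2, u3, u4, u5, v1, v2, v3, v4, v5,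
    x1, x2, x3, x4, x5, y1, y2, y3, y4, y5, z1, z2, z3, z4, z5, String.append_assoc]
-- ===== VERDICT (by name: the statement is the Claim_ definition above) =====
theorem show_info_spec : Claim_equal_show_info := by
  intro map_ls score game_time _ hpre
  exact show_info_spec' map_ls score game_time hpre
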